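-- pv_equiv track=rewrite | github.com/Zeeeepa/graph-sitter | src/contexten/extensions/graph_sitter/analysis/core/class_hierarchy.py | build_inheritance_chain
-- ===== SOURCE A (Python) =====
-- from typing import Dict, List, Optional, Any, Union
--
-- def build_inheritance_chain(class_name: str, inheritance_graph: Dict[str, List[str]], visited: set) -> List[str]:
--     """Build inheritance chain starting from a class."""
--     try:
--         if class_name in visited:
--             return [class_name]
--
--         visited.add(class_name)
--         chain = [class_name]
--
--         parents = inheritance_graph.get(class_name, [])
--         for parent in parents:
--             parent_chain = build_inheritance_chain(parent, inheritance_graph, visited.copy())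
--             chain.extend(parent_chain)
--
--         return chain
--     except Exception:
--         return [class_name]
-- ===== SOURCE B (Python) =====
-- def build_inheritance_chain(class_name: str, inheritance_graph, visited: set):
--     """Iterative preorder DFS with an explicit worklist of (node, ancestors) frames."""
--     try:
--         root_ancestors = set(visited)
--         visited.add(class_name)  # same caller-visible effect as the recursive version
--         out = []
--         stack = [(class_name, root_ancestors)]
--         while stack:
--             node, ancestors = stack.pop()
--             out.append(node)
--             if node in ancestors:
--                 continue
--             child_ancestors = ancestors | {node}
--             for parent in reversed(inheritance_graph.get(node, [])):
--                 stack.append((parent, child_ancestors))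
--         return out
--     except Exception:
--         return [class_name]
-- ===== Notes on version B (the rewrite author's own statement) =====
-- stated objective: alternative
-- what changed: Replaces the self-recursive DFS (with per-parent visited copies) by an iterative preorder traversal over an explicit worklist of (node, ancestors) frames, appending to a single output list.
import Mathlib
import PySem

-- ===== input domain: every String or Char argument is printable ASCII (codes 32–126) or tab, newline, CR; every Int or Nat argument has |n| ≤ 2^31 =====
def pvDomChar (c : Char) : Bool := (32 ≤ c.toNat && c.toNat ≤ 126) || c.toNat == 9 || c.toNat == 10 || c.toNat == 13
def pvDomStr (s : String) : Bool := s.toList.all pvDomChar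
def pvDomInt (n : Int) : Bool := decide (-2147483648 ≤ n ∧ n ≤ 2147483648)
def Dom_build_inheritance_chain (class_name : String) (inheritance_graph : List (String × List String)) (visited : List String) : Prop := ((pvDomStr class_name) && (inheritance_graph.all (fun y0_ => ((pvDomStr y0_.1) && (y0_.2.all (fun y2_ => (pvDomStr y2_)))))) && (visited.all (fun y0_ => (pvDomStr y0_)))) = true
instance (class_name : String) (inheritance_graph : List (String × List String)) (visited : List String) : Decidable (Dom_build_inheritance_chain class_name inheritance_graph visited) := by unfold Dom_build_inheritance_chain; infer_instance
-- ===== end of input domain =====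

-- B replaces A's recursion by an explicit worklist of (node, ancestors) frames (objective: alternative,
-- similar cost). Equivalence is about the RETURN value; Python A mutates `visited` by adding only
-- `class_name`, and Python B performs the identical mutation.

-- ===== PORT A =====
-- `pvKeysFree`: number of distinct graph keys not yet visited — bounds A's recursion depth and
-- provides the fuel below (a totality guard only: fuel pvKeysFree+1 always suffices, see pvAux_congr/pvAux_chain)
def pvKeysFree (g : List (String × List String)) (V : List String) : Nat :=
  ((PySem.List.dedup (g.map Prod.fst)).filter (fun k => !(V.contains k))).length
-- A's recursion, step for step (fuel is a totality guard; the 0 case is never reached from the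
-- wrapper's fuel; Python's per-call `visited.copy()` means every parent call sees exactly
-- visited ∪ {class_name}, i.e. `PySem.Set.add visited class_name`)
def pvAux : Nat → String → List (String × List String) → List String → List String
  | 0, class_name, _, _ => [class_name]
  | n+1, class_name, inheritance_graph, visited =>
    if visited.contains class_name then [class_name]
    else
      let visited' := PySem.Set.add visited class_name
      (PySem.Dict.getD ⟨inheritance_graph⟩ class_name []).foldl
        (fun chain p => chain ++ pvAux n p inheritance_graph visited') [class_name]
-- literal port of A
def build_inheritance_chain (class_name : String) (inheritance_graph : List (String × List String)) (visited : List String) : List String :=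
  pvAux (pvKeysFree inheritance_graph visited + 1) class_name inheritance_graph visited

-- ===== PORT B =====
-- frame weight base^(free keys + 1), base > every parents-list length + 1: fuel for the worklist
-- (a totality guard only: each iteration strictly decreases the stack's total weight, see pvPush_lt)
def pvBase (g : List (String × List String)) : Nat :=
  (g.map (fun kv => kv.2.length)).foldr max 0 + 2
def pvFrameW (g : List (String × List String)) (V : List String) : Nat :=
  pvBase g ^ (pvKeysFree g V + 1)
-- the worklist loop of B: pop a frame, emit its node, push its parents with ancestors ∪ {node}.
-- Python pushes `reversed(parents)` onto a LIFO and pops from the end; with head-as-top that is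
-- exactly prepending `parents` in order.
def pvLoop : Nat → List (String × List String) → List (String × List String) → List String → List String
  | 0, _, _, out => out
  | n+1, g, stack, out =>
    match stack with
    | [] => out
    | (node, anc) :: rest =>
      if anc.contains node then pvLoop n g rest (out ++ [node])
      else
        pvLoop n g
          (((PySem.Dict.getD ⟨g⟩ node []).map (fun p => (p, PySem.Set.add anc node))) ++ rest)
          (out ++ [node])
-- literal port of B: seed the worklist with the root and its (unmodified) ancestor set
def build_inheritance_chain_alt (class_name : String) (inheritance_graph : List (String × List String)) (visited : List String) : List String :=
  pvLoop (pvFrameW inheritance_graph visited) inheritance_graph [(class_name, visited)] []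

-- ===== PRECONDITION & SPEC =====
def Spec_build_inheritance_chain (class_name : String) (inheritance_graph : List (String × List String)) (visited : List String) (out : List String) : Prop := out = build_inheritance_chain_alt class_name inheritance_graph visited
instance (class_name : String) (inheritance_graph : List (String × List String)) (visited : List String) (out : List String) : Decidable (Spec_build_inheritance_chain class_name inheritance_graph visited out) := by unfold Spec_build_inheritance_chain; infer_instance

-- ===== CLAIM (what is proved, stated in full; the proofs are below) =====
def Claim_equal_build_inheritance_chain : Prop := ∀ (class_name : String) (inheritance_graph : List (String × List String)) (visited : List String), Dom_build_inheritance_chain class_name inheritance_graph visited → Spec_build_inheritance_chain class_name inheritance_graph visited (build_inheritance_chain class_name inheritance_graph visited)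

-- ===== LEMMAS AND PROOFS =====

-- a nonempty parents list means the node is a graph key
theorem pvGetD_ne_nil_mem_keys (g : List (String × List String)) (c : String)
    (h : PySem.Dict.getD ⟨g⟩ c [] ≠ []) : c ∈ g.map Prod.fst := by
  induction g with
  | nil => simp [PySem.Dict.getD, PySem.Dict.get?] at h
  | cons kv rest ih =>
    obtain ⟨k, vs⟩ := kv
    by_cases hk : k = c
    · rw [List.map_cons, hk]; exact List.mem_cons_self ..
    · right
      apply ih
      simpa [PySem.Dict.getD_eq_get?_getD, PySem.Dict.get?_mk_cons, hk] using h
-- visiting an unvisited key strictly shrinks the free-key count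
theorem pvKeysFree_add_lt (g : List (String × List String)) (V : List String) (c : String)
    (hk : c ∈ g.map Prod.fst) (hv : V.contains c = false) :
    pvKeysFree g (PySem.Set.add V c) < pvKeysFree g V := by
  unfold pvKeysFree
  have hmono : ∀ x, (!(PySem.Set.add V c).contains x) = true → (!V.contains x) = true := by
    intro x hx
    simp only [Bool.not_eq_true', PySem.Set.contains_eq_listContains, List.contains_eq_mem,
      decide_eq_false_iff_not, PySem.Set.mem_add] at hx ⊢
    exact fun h => hx (Or.inl h)
  have hsub := List.monotone_filter_right (PySem.List.dedup (g.map Prod.fst)) hmono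
  have hlen := hsub.length_le
  rcases Nat.lt_or_ge (((PySem.List.dedup (g.map Prod.fst)).filter (fun k => !((PySem.Set.add V c).contains k))).length)
      (((PySem.List.dedup (g.map Prod.fst)).filter (fun k => !(V.contains k))).length) with h | h
  · exact h
  · exfalso
    have heq := hsub.eq_of_length (Nat.le_antisymm hlen h)
    have hcmem : c ∈ (PySem.List.dedup (g.map Prod.fst)).filter (fun k => !(V.contains k)) := by
      simp only [List.mem_filter, PySem.List.mem_dedup]
      exact ⟨hk, by simpa using hv⟩
    rw [← heq] at hcmem
    have := (List.mem_filter.mp hcmem).2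
    simp [PySem.Set.contains_eq_listContains, PySem.Set.mem_add] at this
theorem pvGetD_length_le (g : List (String × List String)) (c : String) :
    (PySem.Dict.getD ⟨g⟩ c []).length ≤ pvBase g - 2 := by
  unfold pvBase
  induction g with
  | nil => simp [PySem.Dict.getD, PySem.Dict.get?]
  | cons kv rest ih =>
    obtain ⟨k, vs⟩ := kv
    by_cases hk : k = c
    · simp only [PySem.Dict.getD_eq_get?_getD, PySem.Dict.get?_mk_cons, List.map_cons, List.foldr_cons]
      rw [if_pos (by simpa using hk)]
      simp
    · simp only [PySem.Dict.getD_eq_get?_getD, PySem.Dict.get?_mk_cons, List.map_cons, List.foldr_cons]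
      rw [if_neg (by simpa using hk)]
      have := ih
      simp only [PySem.Dict.getD_eq_get?_getD] at this
      omega
theorem pvFrameW_pos (g : List (String × List String)) (V : List String) : 0 < pvFrameW g V :=
  Nat.pow_pos (by unfold pvBase; omega)
-- pushed frames weigh strictly less than the popped frame
theorem pvPush_lt (g : List (String × List String)) (node : String) (anc : List String)
    (hv : anc.contains node = false) :
    (((PySem.Dict.getD ⟨g⟩ node []).map (fun p => ((p, PySem.Set.add anc node) : String × List String))).map
        (fun f => pvFrameW g f.2)).sum < pvFrameW g anc := by
  rw [List.map_map]
  rw [show ((fun f : String × List String => pvFrameW g f.2) ∘ fun p : String => (p, PySem.Set.add anc node)) = fun _ => pvFrameW g (PySem.Set.add anc node) from rfl]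
  rw [List.map_const', List.sum_replicate, smul_eq_mul]
  rcases List.eq_nil_or_concat (PySem.Dict.getD ⟨g⟩ node []) with hnil | ⟨_, _, hne⟩
  · rw [hnil]
    simpa using pvFrameW_pos g anc
  · have hnenil : PySem.Dict.getD ⟨g⟩ node [] ≠ [] := by rw [hne]; simp
    have hkey := pvGetD_ne_nil_mem_keys g node hnenil
    have hlt := pvKeysFree_add_lt g anc node hkey hv
    have hlen := pvGetD_length_le g node
    have hb2 : 2 ≤ pvBase g := by unfold pvBase; omega
    have hpow : pvFrameW g (PySem.Set.add anc node) ≤ pvBase g ^ (pvKeysFree g anc) := by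
      unfold pvFrameW
      exact Nat.pow_le_pow_right (by omega) (by omega)
    have hmul : (PySem.Dict.getD ⟨g⟩ node []).length * pvFrameW g (PySem.Set.add anc node)
        ≤ (pvBase g - 2) * pvBase g ^ (pvKeysFree g anc) :=
      Nat.mul_le_mul hlen hpow
    have hstrict : (pvBase g - 2) * pvBase g ^ (pvKeysFree g anc) < pvFrameW g anc := by
      unfold pvFrameW
      rw [pow_succ, mul_comm (pvBase g ^ pvKeysFree g anc) (pvBase g)]
      have hp : 0 < pvBase g ^ pvKeysFree g anc := Nat.pow_pos (by omega)
      have hlt2 : pvBase g - 2 < pvBase g := by omega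
      exact Nat.mul_lt_mul_of_lt_of_le hlt2 (le_refl _) hp
    exact lt_of_le_of_lt hmul hstrict
-- fuel irrelevance for the recursion, above the adequacy bound
-- fuel irrelevance for A's recursion above the adequacy bound
theorem pvAux_congr (g : List (String × List String)) :
    ∀ n, ∀ m (c : String) (V : List String), pvKeysFree g V < n → pvKeysFree g V < m →
      pvAux n c g V = pvAux m c g V := by
  intro n
  induction n using Nat.strong_induction_on with
  | _ n ih =>
    intro m c V hn hm
    match n, m with
    | n'+1, m'+1 =>
      rw [pvAux, pvAux]
      by_cases hc : V.contains c
      · rw [if_pos hc, if_pos hc]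
      · rw [if_neg hc, if_neg hc]
        apply PySem.List.foldl_congr_mem
        intro acc p hp
        have hkey : c ∈ g.map Prod.fst := pvGetD_ne_nil_mem_keys g c (List.ne_nil_of_mem hp)
        have hlt := pvKeysFree_add_lt g V c hkey (by simpa using hc)
        rw [ih n' (by omega) m' p (PySem.Set.add V c) (by omega) (by omega)]
-- one unfolding of A's recursion at adequate fuel
theorem pvAux_chain (g : List (String × List String)) (c : String) (V : List String)
    (hc : V.contains c = false) :
    pvAux (pvKeysFree g V + 1) c g V =
      c :: ((PySem.Dict.getD ⟨g⟩ c []).map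
        (fun p => pvAux (pvKeysFree g (PySem.Set.add V c) + 1) p g (PySem.Set.add V c))).flatten := by
  rw [pvAux]
  rw [if_neg (by simpa using hc)]
  rw [PySem.List.foldl_append_eq_flatMap]
  rw [List.flatMap_def, List.singleton_append]
  congr 2
  apply List.map_congr_left
  intro p hp
  have hkey : c ∈ g.map Prod.fst := pvGetD_ne_nil_mem_keys g c (List.ne_nil_of_mem hp)
  have hlt := pvKeysFree_add_lt g V c hkey hc
  exact pvAux_congr g _ _ p (PySem.Set.add V c) (by omega) (by omega)
-- loop invariant: with enough fuel, the worklist result is the output so far followed by each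
-- frame's recursive chain
theorem pvLoop_eq (g : List (String × List String)) :
    ∀ n (stack : List (String × List String)) (out : List String),
      (stack.map (fun f => pvFrameW g f.2)).sum ≤ n →
      pvLoop n g stack out =
        out ++ (stack.map (fun f => pvAux (pvKeysFree g f.2 + 1) f.1 g f.2)).flatten := by
  intro n
  induction n with
  | zero =>
    intro stack out h
    match stack with
    | [] => simp [pvLoop]
    | (node, anc) :: rest =>
      exfalso
      have := pvFrameW_pos g anc
      simp only [List.map_cons, List.sum_cons] at h
      omega
  | succ n ih =>
    intro stack out h
    match stack with
    | [] => simp [pvLoop]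
    | (node, anc) :: rest =>
      simp only [List.map_cons, List.sum_cons] at h
      by_cases hc : anc.contains node
      · rw [pvLoop, if_pos hc]
        rw [ih rest (out ++ [node]) (by have := pvFrameW_pos g anc; omega)]
        simp only [List.map_cons, List.flatten_cons]
        rw [pvAux, if_pos hc]
        simp
      · rw [pvLoop, if_neg hc]
        have hpush := pvPush_lt g node anc (by simpa using hc)
        rw [ih _ (out ++ [node]) (by
          simp only [List.map_append, List.sum_append]
          have h2 := Nat.add_lt_add_right hpush ((List.map (fun f => pvFrameW g f.2) rest).sum)
          omega)]
        simp only [List.map_cons, List.flatten_cons, List.map_append, List.flatten_append]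
        rw [pvAux_chain g node anc (by simpa using hc)]
        simp [List.map_map, Function.comp_def, List.append_assoc]
-- ===== VERDICT (by name: the statement is the Claim_ definition above) =====
theorem build_inheritance_chain_spec : Claim_equal_build_inheritance_chain := by
  intro c g V _
  unfold Spec_build_inheritance_chain build_inheritance_chain build_inheritance_chain_alt
  rw [pvLoop_eq g (pvFrameW g V) [(c, V)] [] (by simp)]
  simp
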